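-- pv_equiv track=rewrite | github.com/Wilson0825/Coding-challenges | Hackercup 2017/R1/q3.py | min_gas
-- ===== SOURCE A (Python) =====
-- max_int = 2<<30
--
-- def min_gas(family, distance):
--     start = 0
--     f = [[x[0]-1, x[1]-1] for x in family]
--     for x in f:
--         if distance[x[0]][x[1]] == max_int:
--             return -1
--
--     dp = [[0 for _ in range(len(f))] for _ in range(2)]
--     dp[0][0] = distance[start][f[0][0]] + distance[f[0][0]][f[0][1]]
--     if len(f) == 1:
--         return dp[0][0]
--     dp[1][0] = distance[start][f[0][0]] + distance[f[0][0]][f[1][0]] + distance[f[1][0]][f[0][1]]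
--     start = f[0][1]
--
--     for i in range(1, len(f)):
--         dp[0][i] = min(dp[0][i-1] + distance[start][f[i][0]] + distance[f[i][0]][f[i][1]],\
--         dp[1][i-1] + distance[start][f[i][1]])
--         if i+1 < len(f):
--             dp[1][i] = min(dp[0][i-1] + distance[start][f[i][0]] + distance[f[i][0]][f[i+1][0]] + distance[f[i+1][0]][f[i][1]],\
--             dp[1][i-1] + distance[start][f[i+1][0]] + distance[f[i+1][0]][f[i][1]])
--         start = f[i][1]
--
--     return dp[0][-1]
-- ===== SOURCE B (Python) =====
-- max_int = 2 << 30
--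
-- def min_gas(family, distance):
--     f = [[x[0] - 1, x[1] - 1] for x in family]
--     for a, b in f:
--         if distance[a][b] == max_int:
--             return -1
--     memo = {}
--
--     def solve(i, carried):
--         # min gas to have served families 0..i; carried = family i+1's child
--         # was already picked up on the leg that dropped family i off
--         if (i, carried) in memo:
--             return memo[(i, carried)]
--         a, b = f[i]
--         if carried:
--             a2 = f[i + 1][0]
--             if i == 0:
--                 v = distance[0][a] + distance[a][a2] + distance[a2][b]
--             else:
--                 s = f[i - 1][1]
--                 v = min(solve(i - 1, False) + distance[s][a] + distance[a][a2] + distance[a2][b],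
--                         solve(i - 1, True) + distance[s][a2] + distance[a2][b])
--         else:
--             if i == 0:
--                 v = distance[0][a] + distance[a][b]
--             else:
--                 s = f[i - 1][1]
--                 v = min(solve(i - 1, False) + distance[s][a] + distance[a][b],
--                         solve(i - 1, True) + distance[s][b])
--         memo[(i, carried)] = v
--         return v
--
--     return solve(len(f) - 1, False)
-- ===== Notes on version B (the rewrite author's own statement) =====
-- stated objective: alternative
-- what changed: Replaces A's forward two-row dp table (with its i+1 lookahead and separate len==1 branch) by a top-down memoized recursion solve(i, carried) on the family index; the len==1 case falls out of the base case.
-- outside the precondition, e.g. on min_gas([[1, 1], [5, 5]], [[2147483648]]): A returns -1, B returns -1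
import Mathlib
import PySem

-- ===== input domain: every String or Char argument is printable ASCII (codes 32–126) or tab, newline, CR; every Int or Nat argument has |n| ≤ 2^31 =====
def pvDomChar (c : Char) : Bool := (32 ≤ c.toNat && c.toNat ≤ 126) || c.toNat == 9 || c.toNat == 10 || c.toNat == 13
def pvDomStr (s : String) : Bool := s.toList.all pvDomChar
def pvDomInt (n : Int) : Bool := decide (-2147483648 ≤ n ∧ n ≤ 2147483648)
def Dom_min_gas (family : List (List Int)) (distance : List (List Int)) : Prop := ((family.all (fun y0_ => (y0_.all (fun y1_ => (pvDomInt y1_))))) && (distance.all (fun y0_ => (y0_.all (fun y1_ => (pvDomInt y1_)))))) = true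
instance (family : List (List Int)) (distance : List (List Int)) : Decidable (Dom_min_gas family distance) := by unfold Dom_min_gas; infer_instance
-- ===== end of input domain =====

-- B replaces A's forward two-row dp table by a top-down memoized recursion solve(i, carried)
-- over the family index (objective: alternative decomposition, same O(n) cost).

-- shared primitive helpers (faithful Python indexing; the getD defaults only fire outside Pre_)
def pvMaxInt : Int := 2147483648   -- 2 << 30

def pvD (dm : List (List Int)) (i j : Int) : Int :=
  PySem.List.pyGetD ((PySem.List.pyGet? dm i).getD []) j 0

def pvF (family : List (List Int)) : List (Int × Int) :=
  family.map (fun x => (PySem.List.pyGetD x 0 0 - 1, PySem.List.pyGetD x 1 0 - 1))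

-- ===== PORT A =====
def pvAStep (dm : List (List Int)) (f : List (Int × Int))
    (st : List Int × List Int × Int) (i : Int) : List Int × List Int × Int :=
  let dp0 := st.1
  let dp1 := st.2.1
  let start := st.2.2
  let fi := PySem.List.pyGetD f i ((0:Int), (0:Int))
  let d0i := min (PySem.List.pyGetD dp0 (i-1) 0 + pvD dm start fi.1 + pvD dm fi.1 fi.2)
                 (PySem.List.pyGetD dp1 (i-1) 0 + pvD dm start fi.2)
  let dp1' :=
    if i + 1 < (f.length : Int) then
      let fn := PySem.List.pyGetD f (i+1) ((0:Int), (0:Int))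
      dp1 ++ [min (PySem.List.pyGetD dp0 (i-1) 0 + pvD dm start fi.1 + pvD dm fi.1 fn.1 + pvD dm fn.1 fi.2)
                  (PySem.List.pyGetD dp1 (i-1) 0 + pvD dm start fn.1 + pvD dm fn.1 fi.2)]
    else dp1 ++ [0]          -- dp[1][i] keeps its initial 0
  (dp0 ++ [d0i], dp1', fi.2)

def min_gas (family : List (List Int)) (distance : List (List Int)) : Int :=
  let f := pvF family
  if f.any (fun p => pvD distance p.1 p.2 == pvMaxInt) then -1
  else
    match f with
    | [] => -1     -- Python raises here (outside Pre_)
    | p0 :: rest =>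
      let dp00 := pvD distance 0 p0.1 + pvD distance p0.1 p0.2
      match rest with
      | [] => dp00
      | p1 :: _ =>
        let dp10 := pvD distance 0 p0.1 + pvD distance p0.1 p1.1 + pvD distance p1.1 p0.2
        let st := (PySem.List.pyRange 1 (f.length : Int) 1).foldl (pvAStep distance f)
                    ([dp00], [dp10], p0.2)
        PySem.List.pyGetD st.1 (-1) 0

-- ===== PORT B =====
-- solve(i, carried) of Source B; the memo dict only caches values, so the port is the plain recursion
def pvSolve (dm : List (List Int)) (f : List (Int × Int)) : Nat → Bool → Int
  | 0, false =>
      let p := PySem.List.pyGetD f 0 ((0:Int), (0:Int))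
      pvD dm 0 p.1 + pvD dm p.1 p.2
  | 0, true =>
      let p := PySem.List.pyGetD f 0 ((0:Int), (0:Int))
      let q := PySem.List.pyGetD f 1 ((0:Int), (0:Int))
      pvD dm 0 p.1 + pvD dm p.1 q.1 + pvD dm q.1 p.2
  | j+1, false =>
      let p := PySem.List.pyGetD f ((j:Int)+1) ((0:Int), (0:Int))
      let s := (PySem.List.pyGetD f (j:Int) ((0:Int), (0:Int))).2
      min (pvSolve dm f j false + pvD dm s p.1 + pvD dm p.1 p.2)
          (pvSolve dm f j true + pvD dm s p.2)
  | j+1, true =>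
      let p := PySem.List.pyGetD f ((j:Int)+1) ((0:Int), (0:Int))
      let q := PySem.List.pyGetD f ((j:Int)+2) ((0:Int), (0:Int))
      let s := (PySem.List.pyGetD f (j:Int) ((0:Int), (0:Int))).2
      min (pvSolve dm f j false + pvD dm s p.1 + pvD dm p.1 q.1 + pvD dm q.1 p.2)
          (pvSolve dm f j true + pvD dm s q.1 + pvD dm q.1 p.2)

def min_gas_alt (family : List (List Int)) (distance : List (List Int)) : Int :=
  let f := pvF family
  if f.any (fun p => pvD distance p.1 p.2 == pvMaxInt) then -1
  else if f.isEmpty then -1     -- Python raises here (outside Pre_)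
  else pvSolve distance f (f.length - 1) false

-- ===== PRECONDITION & SPEC =====
def pvValid (dm : List (List Int)) (i j : Int) : Bool :=
  match PySem.List.pyGet? dm i with
  | none => false
  | some row => (PySem.List.pyGet? row j).isSome

-- Pre_ = exactly the successful lookups A performs, except: past an early max_int hit (where A
-- already returns -1) it still requires the remaining pre-scan pairs to be valid indices.
def Pre_min_gas (family : List (List Int)) (distance : List (List Int)) : Prop :=
  family ≠ [] ∧ (∀ x ∈ family, 2 ≤ x.length) ∧
  (∀ p ∈ pvF family, pvValid distance p.1 p.2 = true) ∧
  ((∃ p ∈ pvF family, pvD distance p.1 p.2 = pvMaxInt) ∨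
   (pvValid distance 0 (PySem.List.pyGetD (pvF family) 0 ((0:Int),(0:Int))).1 = true ∧
    (2 ≤ (pvF family).length →
      pvValid distance (PySem.List.pyGetD (pvF family) 0 ((0:Int),(0:Int))).1
                       (PySem.List.pyGetD (pvF family) 1 ((0:Int),(0:Int))).1 = true ∧
      pvValid distance (PySem.List.pyGetD (pvF family) 1 ((0:Int),(0:Int))).1
                       (PySem.List.pyGetD (pvF family) 0 ((0:Int),(0:Int))).2 = true ∧
      ∀ i ∈ List.range (pvF family).length, 1 ≤ i →
        (pvValid distance (PySem.List.pyGetD (pvF family) ((i:Int)-1) ((0:Int),(0:Int))).2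
                          (PySem.List.pyGetD (pvF family) (i:Int) ((0:Int),(0:Int))).1 = true ∧
         pvValid distance (PySem.List.pyGetD (pvF family) ((i:Int)-1) ((0:Int),(0:Int))).2
                          (PySem.List.pyGetD (pvF family) (i:Int) ((0:Int),(0:Int))).2 = true ∧
         (i + 1 < (pvF family).length →
           pvValid distance (PySem.List.pyGetD (pvF family) (i:Int) ((0:Int),(0:Int))).1
                            (PySem.List.pyGetD (pvF family) ((i:Int)+1) ((0:Int),(0:Int))).1 = true ∧
           pvValid distance (PySem.List.pyGetD (pvF family) ((i:Int)+1) ((0:Int),(0:Int))).1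
                            (PySem.List.pyGetD (pvF family) (i:Int) ((0:Int),(0:Int))).2 = true ∧
           pvValid distance (PySem.List.pyGetD (pvF family) ((i:Int)-1) ((0:Int),(0:Int))).2
                            (PySem.List.pyGetD (pvF family) ((i:Int)+1) ((0:Int),(0:Int))).1 = true)))))

instance (family : List (List Int)) (distance : List (List Int)) : Decidable (Pre_min_gas family distance) := by
  unfold Pre_min_gas; infer_instance

def pvWitness_min_gas : List (List Int) × List (List Int) := ([[1, 1]], [[0]])

def Spec_min_gas (family : List (List Int)) (distance : List (List Int)) (out : Int) : Prop := out = min_gas_alt family distance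
instance (family : List (List Int)) (distance : List (List Int)) (out : Int) : Decidable (Spec_min_gas family distance out) := by unfold Spec_min_gas; infer_instance

-- ===== CLAIM (what is proved, stated in full; the proofs are below) =====
def Claim_equal_min_gas : Prop := ∀ (family : List (List Int)) (distance : List (List Int)), Dom_min_gas family distance → Pre_min_gas family distance → Spec_min_gas family distance (min_gas family distance)

-- ===== LEMMAS AND PROOFS =====

theorem pvFoldInv (dm : List (List Int)) (p0 p1 : Int × Int) (rest : List (Int × Int)) (j : Nat)
    (hj : j < (p0 :: p1 :: rest).length) :
    (PySem.List.pyRange 1 ((j : Int) + 1) 1).foldl (pvAStep dm (p0 :: p1 :: rest))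
      ([pvD dm 0 p0.1 + pvD dm p0.1 p0.2],
       [pvD dm 0 p0.1 + pvD dm p0.1 p1.1 + pvD dm p1.1 p0.2], p0.2)
    = ((List.range (j+1)).map (fun i => pvSolve dm (p0 :: p1 :: rest) i false),
       (List.range (j+1)).map (fun i => if i + 1 < (p0 :: p1 :: rest).length then pvSolve dm (p0 :: p1 :: rest) i true else 0),
       (PySem.List.pyGetD (p0 :: p1 :: rest) (j : Int) ((0:Int),(0:Int))).2) := by
  induction j with
  | zero =>
      rw [show ((0:Nat):Int) + 1 = 1 by norm_num, PySem.List.pyRange_one_eq_nil le_rfl]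
      simp [pvSolve, PySem.List.pyGetD_ofNat']
  | succ j ih =>
      have hj' : j < (p0 :: p1 :: rest).length := Nat.lt_of_succ_lt hj
      rw [show ((j+1:Nat):Int) + 1 = ((j:Int)+1) + 1 by push_cast; ring,
          PySem.List.pyRange_one_succ_right (by omega), List.foldl_append, ih hj']
      have hgd : ∀ (g : Nat → Int), PySem.List.pyGetD ((List.range (j+1)).map g) (((j:Int)+1)-1) 0 = g j := by
        intro g
        rw [show ((j:Int)+1)-1 = ((j:Nat):Int) by ring, PySem.List.pyGetD_natCast]
        simp [List.getD_eq_getElem?_getD]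
      simp only [List.foldl_cons, List.foldl_nil, pvAStep, hgd]
      have hlen : (p0 :: p1 :: rest).length = rest.length + 2 := by simp
      have e0 : PySem.List.pyGetD (p0 :: p1 :: rest) ((j:Int)) ((0:Int),(0:Int)) = (p0 :: p1 :: rest).getD j ((0:Int),(0:Int)) := by
        rw [PySem.List.pyGetD_natCast]
      have e1 : PySem.List.pyGetD (p0 :: p1 :: rest) ((j:Int)+1) ((0:Int),(0:Int)) = (p0 :: p1 :: rest).getD (j+1) ((0:Int),(0:Int)) := by
        have h : ((j:Int)+1) = ((j+1 : Nat) : Int) := by push_cast; ring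
        rw [h, PySem.List.pyGetD_natCast]
      have e2 : PySem.List.pyGetD (p0 :: p1 :: rest) ((j:Int)+2) ((0:Int),(0:Int)) = (p0 :: p1 :: rest).getD (j+2) ((0:Int),(0:Int)) := by
        have h : ((j:Int)+2) = ((j+2 : Nat) : Int) := by push_cast; ring
        rw [h, PySem.List.pyGetD_natCast]
      have hle : j ≤ rest.length := by omega
      rw [if_pos hj]
      simp only [List.range_succ, List.map_append]
      by_cases hc : j + 1 + 1 < (p0 :: p1 :: rest).length
      · rw [if_pos (show ((j:Int)+1+1 < ((p0::p1::rest).length:Int)) by exact_mod_cast hc)]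
        have h : ((j:Int)+1)+1 = (j:Int)+2 := by ring
        simp [pvSolve, hle, e0, e1, e2, h]
        intro h2
        exact absurd hc (by omega)
      · rw [if_neg (show ¬((j:Int)+1+1 < ((p0::p1::rest).length:Int)) by exact_mod_cast hc)]
        simp [pvSolve, hle, e0, e1, e2]
        intro h2
        exact absurd (show j + 1 + 1 < (p0 :: p1 :: rest).length by omega) hc

theorem pvPortsEq (family distance : List (List Int)) :
    min_gas family distance = min_gas_alt family distance := by
  unfold min_gas min_gas_alt
  cases hf : pvF family with
  | nil => simp
  | cons p0 rest =>
    by_cases hhit : (p0 :: rest).any (fun p => pvD distance p.1 p.2 == pvMaxInt)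
    · simp [hhit]
    · cases rest with
      | nil => simp [hhit, pvSolve]
      | cons p1 rest' =>
        simp only [hhit, Bool.false_eq_true, if_false, List.isEmpty_cons]
        have hcast : ((p0 :: p1 :: rest').length : Int) = ((rest'.length + 1 : Nat) : Int) + 1 := by
          push_cast [List.length_cons]
          ring
        rw [hcast, pvFoldInv distance p0 p1 rest' (rest'.length + 1) (by simp)]
        have hlast : PySem.List.pyGetD
            ((List.range (rest'.length + 1 + 1)).map (fun i => pvSolve distance (p0 :: p1 :: rest') i false)) (-1) 0
            = pvSolve distance (p0 :: p1 :: rest') (rest'.length + 1) false := by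
          rw [List.range_succ, List.map_append]
          exact PySem.List.pyGetD_neg_one_append_singleton _ _ _
        simp [hlast]

-- ===== VERDICT (by name: the statement is the Claim_ definition above) =====
theorem min_gas_spec : Claim_equal_min_gas := by
  intro family distance _ _
  unfold Spec_min_gas
  exact pvPortsEq family distance
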